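-- pv_equiv track=rewrite | github.com/NCIOCPL/cdr-tools | cdr/Utilities/ospa-indicators.py | getProtStatus
-- ===== SOURCE A (Python) =====
-- def getProtStatus(orgStatuses):
--     "Look up the protocol status based on the status of the lead orgs."
--     statusSet = {}
--     for orgStatus in orgStatuses:
--         key = orgStatus.upper()
--         statusSet[key] = 1 + statusSet.get(key, 0)
--     if len(statusSet) == 1:
--         return orgStatuses[0]
--     for status in ("Active",
--                    "Temporarily closed",
--                    "Completed",
--                    "Closed",
--                    "Approved-not yet active"):
--         if status.upper() in statusSet:
--             return status
--     return ""
-- ===== SOURCE B (Python) =====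
-- def getProtStatus(orgStatuses):
--     "Look up the protocol status based on the status of the lead orgs."
--     priorities = ("Active",
--                   "Temporarily closed",
--                   "Completed",
--                   "Closed",
--                   "Approved-not yet active")
--     uppers = [s.upper() for s in orgStatuses]
--     if orgStatuses and all(u == uppers[0] for u in uppers):
--         return orgStatuses[0]
--     rank = {p.upper(): i for i, p in enumerate(priorities)}
--     best = None
--     for u in uppers:
--         r = rank.get(u)
--         if r is not None and (best is None or r < best):
--             best = r
--     return priorities[best] if best is not None else ""
-- ===== Notes on version B (the rewrite author's own statement) =====
-- stated objective: alternative
-- what changed: Instead of counting statuses into a dict and scanning the fixed priority tuple for the first member, B checks the all-same case directly and otherwise makes one min-rank pass over the statuses against a priority→rank dict, returning the priority at the minimum rank.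
import Mathlib
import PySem

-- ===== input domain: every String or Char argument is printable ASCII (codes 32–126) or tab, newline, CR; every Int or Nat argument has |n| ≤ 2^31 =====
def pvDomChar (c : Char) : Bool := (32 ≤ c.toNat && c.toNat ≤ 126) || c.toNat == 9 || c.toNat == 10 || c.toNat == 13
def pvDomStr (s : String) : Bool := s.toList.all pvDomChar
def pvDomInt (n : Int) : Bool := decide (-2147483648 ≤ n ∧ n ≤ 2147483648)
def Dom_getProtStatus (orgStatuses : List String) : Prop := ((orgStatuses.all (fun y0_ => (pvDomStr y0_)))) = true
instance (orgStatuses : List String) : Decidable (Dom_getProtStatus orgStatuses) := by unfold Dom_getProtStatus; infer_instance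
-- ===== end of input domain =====

-- B replaces A's scan over the fixed priority tuple (membership-testing a counting dict) by a
-- single min-rank pass over the input statuses against a rank dict; objective: alternative decomposition.

-- ===== PORT A =====
def getProtStatus (orgStatuses : List String) : String :=
  let statusSet : PySem.Dict String Int :=
    orgStatuses.foldl (fun d orgStatus =>
      let key := PySem.Str.upper orgStatus
      d.insert key (1 + d.getD key 0)) PySem.Dict.empty
  if statusSet.size = 1 then
    -- orgStatuses[0]: the index is always in range here (one key ⇒ nonempty list), so getD "" is never used
    (PySem.List.pyGet? orgStatuses 0).getD ""
  else
    match ["Active", "Temporarily closed", "Completed", "Closed",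
           "Approved-not yet active"].find?
        (fun status => statusSet.contains (PySem.Str.upper status)) with
    | some status => status
    | none => ""

-- ===== PORT B =====
def getProtStatus_alt (orgStatuses : List String) : String :=
  let priorities := ["Active", "Temporarily closed", "Completed", "Closed",
                     "Approved-not yet active"]
  let uppers := orgStatuses.map PySem.Str.upper
  if !orgStatuses.isEmpty && uppers.all (fun u => u == uppers.headD "") then
    -- orgStatuses[0]: in range here (guard ⇒ nonempty), so getD "" is never used
    (PySem.List.pyGet? orgStatuses 0).getD ""
  else
    let rank : PySem.Dict String Int :=
      (PySem.List.enumerate priorities).foldl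
        (fun d ip => d.insert (PySem.Str.upper ip.2) ip.1) PySem.Dict.empty
    let best : Option Int := uppers.foldl
      (fun best u =>
        match rank.get? u with
        | some r =>
          match best with
          | none => some r
          | some b => if r < b then some r else some b
        | none => best) none
    match best with
    | some b => (PySem.List.pyGet? priorities b).getD ""
    | none => ""

-- ===== PRECONDITION & SPEC =====
def Spec_getProtStatus (orgStatuses : List String) (out : String) : Prop := out = getProtStatus_alt orgStatuses
instance (orgStatuses : List String) (out : String) : Decidable (Spec_getProtStatus orgStatuses out) := by unfold Spec_getProtStatus; infer_instance

-- ===== CLAIM (what is proved, stated in full; the proofs are below) =====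
def Claim_equal_getProtStatus : Prop := ∀ (orgStatuses : List String), Dom_getProtStatus orgStatuses → Spec_getProtStatus orgStatuses (getProtStatus orgStatuses)

-- ===== LEMMAS AND PROOFS =====

def pvPrios : List String := ["Active", "Temporarily closed", "Completed", "Closed",
                     "Approved-not yet active"]

def pvRank5 (u : String) : Option Int :=
  if u = "ACTIVE" then some 0 else if u = "TEMPORARILY CLOSED" then some 1
  else if u = "COMPLETED" then some 2 else if u = "CLOSED" then some 3
  else if u = "APPROVED-NOT YET ACTIVE" then some 4 else none

def pvFirstIdx (us : List String) : Option Int :=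
  if us.contains "ACTIVE" then some 0 else if us.contains "TEMPORARILY CLOSED" then some 1
  else if us.contains "COMPLETED" then some 2 else if us.contains "CLOSED" then some 3
  else if us.contains "APPROVED-NOT YET ACTIVE" then some 4 else none

def pvOptMin (a b : Option Int) : Option Int :=
  match a, b with
  | none, b => b
  | some x, none => some x
  | some x, some y => some (min x y)

lemma pvRank_get (u : String) :
    ((PySem.List.enumerate pvPrios).foldl
        (fun d ip => d.insert (PySem.Str.upper ip.2) ip.1) PySem.Dict.empty).get? u = pvRank5 u := by
  by_cases h0 : u = "ACTIVE"
  · subst h0; rfl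
  by_cases h1 : u = "TEMPORARILY CLOSED"
  · subst h1; rfl
  by_cases h2 : u = "COMPLETED"
  · subst h2; rfl
  by_cases h3 : u = "CLOSED"
  · subst h3; rfl
  by_cases h4 : u = "APPROVED-NOT YET ACTIVE"
  · subst h4; rfl
  have h : (PySem.List.enumerate pvPrios).foldl
        (fun d ip => d.insert (PySem.Str.upper ip.2) ip.1) (PySem.Dict.empty : PySem.Dict String Int)
      = PySem.Dict.mk [("ACTIVE", 0), ("TEMPORARILY CLOSED", 1), ("COMPLETED", 2),
          ("CLOSED", 3), ("APPROVED-NOT YET ACTIVE", 4)] := by rfl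
  have e0 : (("ACTIVE" : String) == u) = false := by simp [Ne.symm h0]
  have e1 : (("TEMPORARILY CLOSED" : String) == u) = false := by simp [Ne.symm h1]
  have e2 : (("COMPLETED" : String) == u) = false := by simp [Ne.symm h2]
  have e3 : (("CLOSED" : String) == u) = false := by simp [Ne.symm h3]
  have e4 : (("APPROVED-NOT YET ACTIVE" : String) == u) = false := by simp [Ne.symm h4]
  rw [h]
  simp only [PySem.Dict.get?_mk_cons, pvRank5, e0, e1, e2, e3, e4, h0, h1, h2, h3, h4]
  rfl

def pvStep (rank : PySem.Dict String Int) (best : Option Int) (u : String) : Option Int :=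
  match rank.get? u with
  | some r =>
    match best with
    | none => some r
    | some b => if r < b then some r else some b
  | none => best

lemma pvOptMin_none (a : Option Int) : pvOptMin a none = a := by cases a <;> rfl

lemma pvOptMin_assoc (a b c : Option Int) : pvOptMin (pvOptMin a b) c = pvOptMin a (pvOptMin b c) := by
  cases a <;> cases b <;> cases c <;> simp [pvOptMin, min_assoc]

def pvNMin : List String → Option Int
  | [] => none
  | u :: us => pvOptMin (pvRank5 u) (pvNMin us)

lemma pvStep_eq (rank : PySem.Dict String Int) (acc : Option Int) (u : String)
    (h : rank.get? u = pvRank5 u) :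
    pvStep rank acc u = pvOptMin acc (pvRank5 u) := by
  unfold pvStep
  rw [h]
  cases hr : pvRank5 u <;> cases acc <;> simp [pvOptMin, min_def] <;> (try split_ifs) <;> first | rfl | omega

lemma pvFold_eq (rank : PySem.Dict String Int)
    (hr : ∀ u, rank.get? u = pvRank5 u) :
    ∀ (us : List String) (acc : Option Int),
      us.foldl (pvStep rank) acc = pvOptMin acc (pvNMin us) := by
  intro us
  induction us with
  | nil => intro acc; simp [pvNMin, pvOptMin_none]
  | cons u us ih =>
      intro acc
      simp only [List.foldl_cons, ih, pvStep_eq rank _ _ (hr u), pvNMin, pvOptMin_assoc]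

lemma pvNMin_eq_firstIdx : ∀ us : List String, pvNMin us = pvFirstIdx us := by
  intro us
  induction us with
  | nil => simp [pvNMin, pvFirstIdx]
  | cons u us ih =>
      show pvOptMin (pvRank5 u) (pvNMin us) = pvFirstIdx (u :: us)
      rw [ih]
      by_cases h0 : u = "ACTIVE"
      · subst h0
        have hf : pvFirstIdx ("ACTIVE" :: us) = some 0 := by
          unfold pvFirstIdx; simp
        rw [hf, show pvRank5 "ACTIVE" = some 0 from rfl]
        unfold pvFirstIdx; split_ifs <;> rfl
      by_cases h1 : u = "TEMPORARILY CLOSED"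
      · subst h1
        rw [show pvRank5 "TEMPORARILY CLOSED" = some 1 from rfl]
        unfold pvFirstIdx
        simp only [List.contains_cons]
        cases hb0 : us.contains "ACTIVE" <;>
          simp <;> first | decide | (split_ifs <;> decide)
      by_cases h2 : u = "COMPLETED"
      · subst h2
        rw [show pvRank5 "COMPLETED" = some 2 from rfl]
        unfold pvFirstIdx
        simp only [List.contains_cons]
        cases hb0 : us.contains "ACTIVE" <;> cases hb1 : us.contains "TEMPORARILY CLOSED" <;>
          simp <;> first | decide | (split_ifs <;> decide)
      by_cases h3 : u = "CLOSED"
      · subst h3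
        rw [show pvRank5 "CLOSED" = some 3 from rfl]
        unfold pvFirstIdx
        simp only [List.contains_cons]
        cases hb0 : us.contains "ACTIVE" <;> cases hb1 : us.contains "TEMPORARILY CLOSED" <;>
          cases hb2 : us.contains "COMPLETED" <;>
          simp <;> first | decide | (split_ifs <;> decide)
      by_cases h4 : u = "APPROVED-NOT YET ACTIVE"
      · subst h4
        rw [show pvRank5 "APPROVED-NOT YET ACTIVE" = some 4 from rfl]
        unfold pvFirstIdx
        simp only [List.contains_cons]
        cases hb0 : us.contains "ACTIVE" <;> cases hb1 : us.contains "TEMPORARILY CLOSED" <;>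
          cases hb2 : us.contains "COMPLETED" <;> cases hb3 : us.contains "CLOSED" <;>
          simp <;> first | decide | (split_ifs <;> decide)
      · have r : pvRank5 u = none := by unfold pvRank5; simp [h0, h1, h2, h3, h4]
        rw [r]
        unfold pvFirstIdx
        simp [Ne.symm h0, Ne.symm h1, Ne.symm h2, Ne.symm h3, Ne.symm h4, pvOptMin]

lemma pvAdd_prefix : ∀ (us : List String) (acc : List String),
    acc <+: us.foldl PySem.Set.add acc := by
  intro us
  induction us with
  | nil => intro acc; simp
  | cons u us ih =>
      intro acc
      refine List.IsPrefix.trans ?_ (ih (PySem.Set.add acc u))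
      simp [PySem.Set.add]
      split_ifs <;> simp

lemma pvFold_singleton : ∀ (us : List String) (a : String),
    (us.foldl PySem.Set.add [a] = [a] ↔ ∀ x ∈ us, x = a) := by
  intro us
  induction us with
  | nil => intro a; simp
  | cons u us ih =>
      intro a
      by_cases h : u = a
      · subst h
        simp [ih u]
      · have ha : PySem.Set.add [a] u = [a, u] := by
          simp [PySem.Set.add, h]
        have hpre := pvAdd_prefix us [a, u]
        constructor
        · intro he
          exfalso
          rw [List.foldl_cons, ha] at he
          have := hpre.length_le
          rw [he] at this
          simp at this
        · intro hall
          exact absurd (hall u (by simp)) h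

lemma pvOfList_len_one (u : String) (us : List String) :
    ((PySem.Set.ofList (u :: us)).length = 1 ↔ ∀ x ∈ us, x = u) := by
  have h1 : PySem.Set.ofList (u :: us) = us.foldl PySem.Set.add [u] := by
    simp [PySem.Set.ofList_eq_foldl, PySem.Set.add]
  rw [h1]
  constructor
  · intro hl
    have hpre := pvAdd_prefix us [u]
    have : us.foldl PySem.Set.add [u] = [u] := by
      refine (hpre.eq_of_length_le ?_).symm
      simp [hl]
    exact (pvFold_singleton us u).mp this
  · intro hall
    rw [(pvFold_singleton us u).mpr hall]
    rfl
-- single min-rank pass over the input statuses against a rank dict; objective: alternative decomposition.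

lemma pvKeys_statusSet (orgStatuses : List String) :
    (orgStatuses.foldl (fun d orgStatus =>
      d.insert (PySem.Str.upper orgStatus)
        (1 + d.getD (PySem.Str.upper orgStatus) 0)) (PySem.Dict.empty : PySem.Dict String Int)).keys
      = PySem.Set.ofList (orgStatuses.map PySem.Str.upper) := by
  rw [PySem.Dict.keys_foldl_insert_key]
  simp [PySem.Dict.keys_empty]
  rfl

lemma pvMain (orgStatuses : List String) :
    getProtStatus orgStatuses = getProtStatus_alt orgStatuses := by
  unfold getProtStatus getProtStatus_alt
  simp only []
  set us := orgStatuses.map PySem.Str.upper with hus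
  have hkeys := pvKeys_statusSet orgStatuses
  set d := orgStatuses.foldl (fun d orgStatus =>
      d.insert (PySem.Str.upper orgStatus)
        (1 + d.getD (PySem.Str.upper orgStatus) 0)) (PySem.Dict.empty : PySem.Dict String Int) with hd
  have hsize : d.size = (PySem.Set.ofList us).length := by
    rw [PySem.Dict.size, ← hkeys]
    simp [PySem.Dict.keys]
  have hguard : (d.size = 1) ↔
      ((!orgStatuses.isEmpty && us.all (fun u => u == us.headD "")) = true) := by
    cases orgStatuses with
    | nil => simp [hsize, hus, PySem.Set.ofList]
    | cons x xs =>
        rw [hsize]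
        simp only [hus, List.map_cons]
        rw [pvOfList_len_one]
        simp [List.all_eq_true]
  have hc : ∀ k, d.contains k = us.contains k := by
    intro k
    rw [PySem.Dict.contains_eq_decide_mem_keys, hkeys, ← hus, Bool.eq_iff_iff]
    simp [PySem.Set.mem_ofList]
  by_cases hg : (!orgStatuses.isEmpty && us.all (fun u => u == us.headD "")) = true
  · rw [if_pos (hguard.mpr hg), if_pos hg]
  · rw [if_neg (fun h => hg (hguard.mp h)), if_neg hg]
    have hrank : ∀ u, ((PySem.List.enumerate ["Active", "Temporarily closed", "Completed",
        "Closed", "Approved-not yet active"]).foldl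
        (fun d ip => d.insert (PySem.Str.upper ip.2) ip.1)
        (PySem.Dict.empty : PySem.Dict String Int)).get? u = pvRank5 u := fun u => pvRank_get u
    have hfold : us.foldl
        (fun best u =>
          match ((PySem.List.enumerate ["Active", "Temporarily closed", "Completed",
              "Closed", "Approved-not yet active"]).foldl
              (fun d ip => d.insert (PySem.Str.upper ip.2) ip.1)
              (PySem.Dict.empty : PySem.Dict String Int)).get? u with
          | some r =>
            match best with
            | none => some r
            | some b => if r < b then some r else some b
          | none => best) (none : Option Int) = pvFirstIdx us := by
      have h1 : us.foldl
        (fun best u =>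
          match ((PySem.List.enumerate ["Active", "Temporarily closed", "Completed",
              "Closed", "Approved-not yet active"]).foldl
              (fun d ip => d.insert (PySem.Str.upper ip.2) ip.1)
              (PySem.Dict.empty : PySem.Dict String Int)).get? u with
          | some r =>
            match best with
            | none => some r
            | some b => if r < b then some r else some b
          | none => best) (none : Option Int) = pvOptMin none (pvNMin us) :=
        pvFold_eq _ hrank us none
      rw [h1, pvNMin_eq_firstIdx]
      rfl
    rw [hfold]
    have u0 : PySem.Str.upper "Active" = "ACTIVE" := rfl
    have u1 : PySem.Str.upper "Temporarily closed" = "TEMPORARILY CLOSED" := rfl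
    have u2 : PySem.Str.upper "Completed" = "COMPLETED" := rfl
    have u3 : PySem.Str.upper "Closed" = "CLOSED" := rfl
    have u4 : PySem.Str.upper "Approved-not yet active" = "APPROVED-NOT YET ACTIVE" := rfl
    by_cases hb0 : "ACTIVE" ∈ us <;> by_cases hb1 : "TEMPORARILY CLOSED" ∈ us <;>
      by_cases hb2 : "COMPLETED" ∈ us <;> by_cases hb3 : "CLOSED" ∈ us <;>
      by_cases hb4 : "APPROVED-NOT YET ACTIVE" ∈ us <;>
      simp [List.find?, hc, u0, u1, u2, u3, u4, hb0, hb1, hb2, hb3, hb4, pvFirstIdx]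

-- ===== VERDICT (by name: the statement is the Claim_ definition above) =====
theorem getProtStatus_spec : Claim_equal_getProtStatus := by
  intro orgStatuses _
  unfold Spec_getProtStatus
  exact pvMain orgStatuses
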